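-- pv_equiv track=rewrite | github.com/DinizKaua/OCCNT | backend/API/core/store.py | _previsao_linear
-- ===== SOURCE A (Python) =====
-- from typing import List, Dict, Optional
--
-- def _previsao_linear(ultimo_valor: int, anos: int = 3, passo: int = 10, ano_inicio: int = 2024) -> List[Dict]:
--     """Gera previsão linear (mock) a partir do último valor observado."""
--     out = []
--     v = ultimo_valor
--     ano = ano_inicio
--     for _ in range(anos):
--         v += passo
--         out.append({"ano": ano, "valor": v})
--         ano += 1
--     return out
-- ===== SOURCE B (Python) =====
-- from typing import List, Dict, Optional
--
-- def _previsao_linear(ultimo_valor: int, anos: int = 3, passo: int = 10, ano_inicio: int = 2024) -> List[Dict]: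
--     """Gera previsão linear (mock) a partir do último valor observado."""
--     return [{"ano": ano_inicio + i, "valor": ultimo_valor + passo * (i + 1)}
--             for i in range(anos)]
-- ===== Notes on version B (the rewrite author's own statement) =====
-- stated objective: simpler
-- what changed: Replaced the stateful loop threading two running accumulators (v and ano) with a single list comprehension computing each entry in closed form from the index i (ano_inicio + i, ultimo_valor + passo*(i+1)).
import Mathlib
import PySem

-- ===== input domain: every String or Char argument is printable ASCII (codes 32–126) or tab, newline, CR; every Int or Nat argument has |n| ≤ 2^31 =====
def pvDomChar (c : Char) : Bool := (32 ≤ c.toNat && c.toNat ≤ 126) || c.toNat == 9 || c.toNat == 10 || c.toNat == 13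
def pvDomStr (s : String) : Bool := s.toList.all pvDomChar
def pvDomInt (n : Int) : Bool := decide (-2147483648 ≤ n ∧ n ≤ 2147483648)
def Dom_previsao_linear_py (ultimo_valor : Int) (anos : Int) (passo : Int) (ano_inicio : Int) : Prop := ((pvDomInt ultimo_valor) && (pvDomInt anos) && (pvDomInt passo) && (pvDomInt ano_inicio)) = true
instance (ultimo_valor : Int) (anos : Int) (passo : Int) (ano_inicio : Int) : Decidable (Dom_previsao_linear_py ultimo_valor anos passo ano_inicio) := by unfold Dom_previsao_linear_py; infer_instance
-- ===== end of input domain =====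

-- B replaces A's loop with two running accumulators by a closed-form map over the index (objective: simpler).
-- ===== PORT A =====
-- for _ in range(anos): v += passo; out.append({...}); ano += 1   — state (out, v, ano)
def previsao_linear_py (ultimo_valor : Int) (anos : Int) (passo : Int) (ano_inicio : Int) : List (List (String × Int)) :=
  let st := (PySem.List.pyRange 0 anos 1).foldl
    (fun (st : List (List (String × Int)) × Int × Int) _ =>
      let v := st.2.1 + passo
      (st.1 ++ [[("ano", st.2.2), ("valor", v)]], v, st.2.2 + 1))
    ([], ultimo_valor, ano_inicio)
  st.1

-- ===== PORT B =====
-- [{"ano": ano_inicio + i, "valor": ultimo_valor + passo*(i+1)} for i in range(anos)]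
def previsao_linear_py_alt (ultimo_valor : Int) (anos : Int) (passo : Int) (ano_inicio : Int) : List (List (String × Int)) :=
  (PySem.List.pyRange 0 anos 1).map
    (fun i => [("ano", ano_inicio + i), ("valor", ultimo_valor + passo * (i + 1))])

-- ===== PRECONDITION & SPEC =====
def Spec_previsao_linear_py (ultimo_valor : Int) (anos : Int) (passo : Int) (ano_inicio : Int) (out : List (List (String × Int))) : Prop := out = previsao_linear_py_alt ultimo_valor anos passo ano_inicio
instance (ultimo_valor : Int) (anos : Int) (passo : Int) (ano_inicio : Int) (out : List (List (String × Int))) : Decidable (Spec_previsao_linear_py ultimo_valor anos passo ano_inicio out) := by unfold Spec_previsao_linear_py; infer_instance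

-- ===== CLAIM (what is proved, stated in full; the proofs are below) =====
def Claim_equal_previsao_linear_py : Prop := ∀ (ultimo_valor : Int) (anos : Int) (passo : Int) (ano_inicio : Int), Dom_previsao_linear_py ultimo_valor anos passo ano_inicio → Spec_previsao_linear_py ultimo_valor anos passo ano_inicio (previsao_linear_py ultimo_valor anos passo ano_inicio)

-- ===== LEMMAS AND PROOFS =====

theorem previsao_linear_py_loop (passo : Int) (n : Nat) :
    ∀ (acc : List (List (String × Int))) (v ano : Int),
    ((List.range n).foldl
      (fun (st : List (List (String × Int)) × Int × Int) _ =>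
        let w := st.2.1 + passo
        (st.1 ++ [[("ano", st.2.2), ("valor", w)]], w, st.2.2 + 1))
      (acc, v, ano))
    = (acc ++ (List.range n).map
        (fun (k : Nat) => [("ano", ano + (k : Int)), ("valor", v + passo * ((k : Int) + 1))]),
       v + passo * n, ano + n) := by
  induction n with
  | zero => intro acc v ano; simp
  | succ n ih =>
    intro acc v ano
    rw [List.range_succ, List.foldl_append, ih, List.map_append]
    simp
    constructor <;> ring

-- ===== VERDICT (by name: the statement is the Claim_ definition above) =====
theorem previsao_linear_py_spec : Claim_equal_previsao_linear_py := by
  intro uv anos passo ai _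
  unfold Spec_previsao_linear_py previsao_linear_py previsao_linear_py_alt
  rw [PySem.List.pyRange_one]
  simp only [Int.sub_zero, List.foldl_map, List.map_map]
  rw [previsao_linear_py_loop]
  simp [Function.comp]
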